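-- pv_equiv track=rewrite | github.com/svantepihl/AdventOfCode2020 | day14/day14.py | part1
-- ===== SOURCE A (Python) =====
-- def part1(insts):
--     vals = {}
--     mask = "X" * 36
--     for inst in insts:
--         if inst[0] == "mask":
--             mask = inst[1]
--         else:
--             curr = list(mask)
--             ind = inst[0][4:-1]
--             val = str(bin(int(inst[1])))[2:]
--             val = "0" * (len(curr) - len(val)) + val
--             for i in range(len(curr)):
--                 if curr[i] == "X":
--                     curr[i] = val[i]
--             vals[ind] = int("".join(curr), 2)
--     return sum(vals.values())
-- ===== SOURCE B (Python) =====
-- def part1(insts):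
--     # Same dict/result as A, but the mask is compiled ONCE into two integers
--     # (or_mask: forced-1 bits; and_mask: the free 'X' bits) in a single pass,
--     # and each mem instruction is a constant-time bitwise update:
--     # no char list, no binary-string padding, no per-write 36-step loop.
--     vals = {}
--     or_mask = 0
--     and_mask = (1 << 36) - 1
--     for inst in insts:
--         if inst[0] == "mask":
--             or_mask = 0
--             and_mask = 0
--             for c in inst[1]:
--                 or_mask = or_mask * 2 + (1 if c == "1" else 0)
--                 and_mask = and_mask * 2 + (1 if c == "X" else 0)
--         else:
--             vals[inst[0][4:-1]] = (int(inst[1]) & and_mask) | or_mask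
--     return sum(vals.values())
-- ===== Notes on version B (the rewrite author's own statement) =====
-- stated objective: faster
-- what changed: Instead of editing a 36-char list and re-parsing a binary string for every mem write, B compiles each mask once into two integers (or_mask of forced-1 bits, and_mask of X bits) and applies every write as the constant-time bitwise update (v & and_mask) | or_mask.
-- outside the precondition, e.g. on part1([['mask', 'X'], ['mem[1]', '2']]): A returns 1, B returns 0; on part1([['mem[1]', '68719476736']]): A returns 34359738368, B returns 0; on part1([['mask', '0000000000000000000000000000000000X0'], ['mem[1]', '-3']]): A returns 2, B returns 0
import Mathlib
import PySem

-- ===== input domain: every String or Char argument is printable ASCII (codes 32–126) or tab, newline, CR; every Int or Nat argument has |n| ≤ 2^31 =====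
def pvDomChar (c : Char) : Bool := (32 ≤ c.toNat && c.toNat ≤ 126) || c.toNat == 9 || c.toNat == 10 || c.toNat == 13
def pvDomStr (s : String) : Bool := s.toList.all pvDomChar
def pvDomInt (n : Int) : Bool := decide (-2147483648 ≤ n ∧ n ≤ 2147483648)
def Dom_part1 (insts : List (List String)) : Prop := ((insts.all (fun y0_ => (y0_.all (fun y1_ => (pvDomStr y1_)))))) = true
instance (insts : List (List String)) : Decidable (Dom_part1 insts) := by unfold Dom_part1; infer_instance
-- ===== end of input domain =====

-- B replaces A's per-write 36-char list editing / binary-string padding / re-parsing by compiling each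
-- mask once into two integers and doing one bitwise update per mem write (a constant-factor speedup).

-- ===== PORT A =====
-- hand port of int(s, 2): exact here, because under Pre_ the joined list is a nonempty
-- list of '0'/'1' characters only (no sign, spaces, underscores or 0b prefix).
def parseBin2 (l : List Char) : Int :=
  l.foldl (fun a c => a * 2 + (if c = '1' then 1 else 0)) 0

def stepA (st : PySem.Dict String Int × String) (inst : List String) :
    PySem.Dict String Int × String :=
  let vals := st.1
  let mask := st.2
  if PySem.List.pyGetD inst 0 "" = "mask" then
    (vals, PySem.List.pyGetD inst 1 "")
  else
    let curr := mask.toList                                     -- curr = list(mask)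
    let ind := PySem.Str.slice (PySem.List.pyGetD inst 0 "") (some 4) (some (-1))
    let v := (PySem.Int.ofStr? (PySem.List.pyGetD inst 1 "")).getD 0   -- int(inst[1]); ValueError excluded by Pre_
    let val := PySem.List.slice (PySem.Int.toBinChars0b v) (some 2) none  -- str(bin(v))[2:]
    let val := List.replicate (curr.length - val.length) '0' ++ val       -- "0"*(len(curr)-len(val)) + val
    let curr := (PySem.List.pyRange 0 (curr.length : Int) 1).foldl
      (fun c i => if PySem.List.pyGetD c i ' ' = 'X'
                  then c.set i.toNat (PySem.List.pyGetD val i ' ') else c) curr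
    (vals.insert ind (parseBin2 curr), mask)                    -- vals[ind] = int("".join(curr), 2)

def part1 (insts : List (List String)) : Int :=
  let st := insts.foldl stepA (PySem.Dict.empty, String.ofList (List.replicate 36 'X'))
  st.1.values.sum

-- ===== PORT B =====
def stepB (st : PySem.Dict String Int × Int × Int) (inst : List String) :
    PySem.Dict String Int × Int × Int :=
  let vals := st.1
  let orM := st.2.1
  let andM := st.2.2
  if PySem.List.pyGetD inst 0 "" = "mask" then
    let p := (PySem.List.pyGetD inst 1 "").toList.foldl
      (fun (p : Int × Int) c =>
        (p.1 * 2 + (if c = '1' then 1 else 0), p.2 * 2 + (if c = 'X' then 1 else 0)))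
      (0, 0)
    (vals, p.1, p.2)
  else
    let v := (PySem.Int.ofStr? (PySem.List.pyGetD inst 1 "")).getD 0
    (vals.insert (PySem.Str.slice (PySem.List.pyGetD inst 0 "") (some 4) (some (-1)))
      (PySem.Int.bor (PySem.Int.band v andM) orM), orM, andM)

def part1_alt (insts : List (List String)) : Int :=
  let st := insts.foldl stepB (PySem.Dict.empty, 0, (1 <<< 36) - 1)
  st.1.values.sum

-- ===== PRECONDITION & SPEC =====
-- Pre_ excludes inputs on which A raises (instructions shorter than 2 entries, non-integer mem
-- values, mask/value characters that make int(_, 2) fail), and it narrows to the instruction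
-- format of the puzzle: a mask that some mem write actually uses must be 36 chars over 0/1/X,
-- and mem values must lie in [0, 2^36); outside that (short or overlong masks, negative or
-- >= 2^36 values) A's returned value comes from accidental string truncation/padding.
def maskOkB (m : String) : Bool :=
  m.toList.length == 36 && m.toList.all (fun c => c == '0' || c == '1' || c == 'X')

def valOkB (s : String) : Bool :=
  decide (0 ≤ (PySem.Int.ofStr? s).getD (-1)) && decide ((PySem.Int.ofStr? s).getD (-1) < 2 ^ 36)

def hasMemB (l : List (List String)) : Bool :=
  l.any (fun i => PySem.List.pyGetD i 0 "" != "mask")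

def preB : List (List String) → Bool
  | [] => true
  | inst :: rest =>
      decide (2 ≤ inst.length) &&
      (if PySem.List.pyGetD inst 0 "" = "mask"
       then !hasMemB rest || maskOkB (PySem.List.pyGetD inst 1 "")
       else valOkB (PySem.List.pyGetD inst 1 "")) &&
      preB rest

def Pre_part1 (insts : List (List String)) : Prop := preB insts = true

instance (insts : List (List String)) : Decidable (Pre_part1 insts) := by
  unfold Pre_part1; infer_instance

def pvWitness_part1 : List (List String) :=
  [["mem[8]", "11"], ["mem[7]", "101"]]

def Spec_part1 (insts : List (List String)) (out : Int) : Prop := out = part1_alt insts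
instance (insts : List (List String)) (out : Int) : Decidable (Spec_part1 insts out) := by
  unfold Spec_part1; infer_instance

-- ===== CLAIM (what is proved, stated in full; the proofs are below) =====
def Claim_equal_part1 : Prop :=
  ∀ (insts : List (List String)), Dom_part1 insts → Pre_part1 insts → Spec_part1 insts (part1 insts)

-- ===== LEMMAS AND PROOFS =====

-- proof-only helpers
def g1 (c : Char) : Bool := c = '1'
def gX (c : Char) : Bool := c = 'X'

def rval : List Bool → Nat
  | [] => 0
  | b :: t => b.toNat + 2 * rval t

def valN (g : Char → Bool) (l : List Char) : Nat :=
  l.foldl (fun a c => 2 * a + (g c).toNat) 0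

def andInt (l : List Char) : Int :=
  l.foldl (fun a c => a * 2 + (if c = 'X' then 1 else 0)) 0

def binDigits (n : Nat) : List Char :=
  if n < 2 then [if n = 1 then '1' else '0']
  else binDigits (n / 2) ++ [if n % 2 = 1 then '1' else '0']
decreasing_by exact Nat.div_lt_self (by omega) (by omega)

lemma valN_append (g : Char → Bool) (l : List Char) (c : Char) :
    valN g (l ++ [c]) = 2 * valN g l + (g c).toNat := by
  simp [valN, List.foldl_append]

lemma valN_eq_rval (g : Char → Bool) (l : List Char) :
    valN g l = rval (l.reverse.map g) := by
  induction l using List.reverseRecOn with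
  | nil => rfl
  | append_singleton t c ih =>
      rw [valN_append, List.reverse_append, ih]
      simp [rval]; omega

lemma testBit_rval (l : List Bool) (k : Nat) :
    (rval l).testBit k = l.getD k false := by
  induction l generalizing k with
  | nil => simp [rval]
  | cons b t ih =>
      cases k with
      | zero =>
          rw [Nat.testBit_zero]
          cases b <;> simp [rval, Nat.add_mul_mod_self_left]
      | succ k =>
          rw [Nat.testBit_succ, rval]
          have : (b.toNat + 2 * rval t) / 2 = rval t := by cases b <;> simp <;> omega
          rw [this, ih]
          rfl

lemma core_bitwise (cs bs : List Char) (h : cs.length = bs.length) :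
    valN g1 (List.zipWith (fun c b => if c = 'X' then b else c) cs bs)
      = (valN g1 bs &&& valN gX cs) ||| valN g1 cs := by
  apply Nat.eq_of_testBit_eq
  intro k
  rw [valN_eq_rval, valN_eq_rval, valN_eq_rval, valN_eq_rval,
      Nat.testBit_lor, Nat.testBit_land, testBit_rval, testBit_rval, testBit_rval, testBit_rval,
      List.reverse_zipWith h, List.map_zipWith]
  by_cases hk : k < cs.length
  · have hk1 : k < cs.reverse.length := by simpa using hk
    have hk2 : k < bs.reverse.length := by simp [← h, hk]
    rw [List.getD_eq_getElem?_getD, List.getD_eq_getElem?_getD, List.getD_eq_getElem?_getD,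
        List.getD_eq_getElem?_getD, List.getElem?_zipWith, List.getElem?_map, List.getElem?_map,
        List.getElem?_map, List.getElem?_eq_getElem hk1, List.getElem?_eq_getElem hk2]
    simp only [Option.map_some, Option.getD_some]
    by_cases hx : cs[cs.length - 1 - k] = 'X'
    · simp [g1, gX, hx]
    · simp [g1, gX, hx]
  · have hk' : cs.length ≤ k := Nat.le_of_not_lt hk
    rw [List.getD_eq_default _ _ (by simp; omega), List.getD_eq_default _ _ (by simp [← h]; omega),
        List.getD_eq_default _ _ (by simp; omega), List.getD_eq_default _ _ (by simp; omega)]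
    simp

lemma binDigits_val (n : Nat) : valN g1 (binDigits n) = n := by
  fun_induction binDigits n with
  | case1 n h =>
      interval_cases n <;> decide
  | case2 n h ih =>
      rw [valN_append, ih]
      by_cases h2 : n % 2 = 1 <;> simp [g1, h2] <;> omega

lemma binDigits_length (n k : Nat) (hk : 1 ≤ k) (hn : n < 2 ^ k) :
    (binDigits n).length ≤ k := by
  fun_induction binDigits n generalizing k with
  | case1 n h => simpa using hk
  | case2 n h ih =>
      have hk2 : 2 ≤ k := by
        by_contra hc
        interval_cases k <;> omega
      have : n / 2 < 2 ^ (k - 1) := by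
        have : 2 ^ k = 2 ^ (k - 1) * 2 := by
          rw [← pow_succ]; congr 1; omega
        omega
      have := ih (k - 1) (by omega) this
      simp only [List.length_append, List.length_singleton]
      omega

lemma toDigitsCore_eq (f : Nat) : ∀ (n : Nat) (l : List Char), n < f →
    Nat.toDigitsCore 2 f n l = binDigits n ++ l := by
  induction f with
  | zero => omega
  | succ f ih =>
      intro n l hn
      rw [Nat.toDigitsCore]
      by_cases h2 : n < 2
      · have hd : n / 2 = 0 := by omega
        rw [binDigits]
        simp only [hd, if_pos h2]
        interval_cases n <;> rfl
      · have hd : n / 2 ≠ 0 := by omega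
        simp only [if_neg hd]
        rw [ih (n / 2) _ (by omega)]
        conv_rhs => rw [binDigits]
        rw [if_neg h2, List.append_assoc]
        congr 2
        have : n % 2 = 0 ∨ n % 2 = 1 := by omega
        rcases this with h | h <;> simp [h] <;> rfl

lemma toDigits_eq_binDigits (n : Nat) : Nat.toDigits 2 n = binDigits n := by
  rw [Nat.toDigits, toDigitsCore_eq (n + 1) n [] (by omega), List.append_nil]

lemma valN_replicate_zero (g : Char → Bool) (h : g '0' = false) (m : Nat) (l : List Char) :
    valN g (List.replicate m '0' ++ l) = valN g l := by
  induction m with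
  | zero => rfl
  | succ m ih =>
      rw [List.replicate_succ, List.cons_append]
      simpa [valN, h] using ih

-- Int-level folds reduce to Nat-level valN
lemma parseBin2_eq_valN (l : List Char) : parseBin2 l = (valN g1 l : Int) := by
  suffices h : ∀ (b : Nat),
      l.foldl (fun a c => a * 2 + (if c = '1' then 1 else 0)) (b : Int)
        = ((l.foldl (fun a c => 2 * a + (g1 c).toNat) b : Nat) : Int) by
    exact h 0
  induction l with
  | nil => intro b; rfl
  | cons c t ih =>
      intro b
      simp only [List.foldl_cons]
      have hd : ((b : Int) * 2 + (if c = '1' then 1 else 0))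
          = ((2 * b + (g1 c).toNat : Nat) : Int) := by
        by_cases hc : c = '1' <;> simp [g1, hc] <;> push_cast <;> ring
      rw [hd]
      exact ih _

lemma andInt_eq_valN (l : List Char) : andInt l = (valN gX l : Int) := by
  suffices h : ∀ (b : Nat),
      l.foldl (fun a c => a * 2 + (if c = 'X' then 1 else 0)) (b : Int)
        = ((l.foldl (fun a c => 2 * a + (gX c).toNat) b : Nat) : Int) by
    exact h 0
  induction l with
  | nil => intro b; rfl
  | cons c t ih =>
      intro b
      simp only [List.foldl_cons]
      have hd : ((b : Int) * 2 + (if c = 'X' then 1 else 0))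
          = ((2 * b + (gX c).toNat : Nat) : Int) := by
        by_cases hc : c = 'X' <;> simp [gX, hc] <;> push_cast <;> ring
      rw [hd]
      exact ih _

-- B's pair fold computes (or-mask, and-mask) componentwise
lemma pair_fold (l : List Char) : ∀ (p : Int × Int),
    l.foldl (fun (p : Int × Int) c =>
        (p.1 * 2 + (if c = '1' then 1 else 0), p.2 * 2 + (if c = 'X' then 1 else 0))) p
      = (l.foldl (fun a c => a * 2 + (if c = '1' then 1 else 0)) p.1,
         l.foldl (fun a c => a * 2 + (if c = 'X' then 1 else 0)) p.2) := by
  induction l with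
  | nil => intro p; rfl
  | cons c t ih => intro p; simp only [List.foldl_cons, ih]

-- A's index loop is zipWith substitution
lemma loop_aux (vs : List Char) : ∀ (suf pre : List Char),
    pre.length + suf.length = vs.length →
    (PySem.List.pyRange (pre.length : Int) (vs.length : Int) 1).foldl
      (fun c i => if PySem.List.pyGetD c i ' ' = 'X'
                  then c.set i.toNat (PySem.List.pyGetD vs i ' ') else c) (pre ++ suf)
    = pre ++ List.zipWith (fun c b => if c = 'X' then b else c) suf (vs.drop pre.length) := by
  intro suf
  induction suf with
  | nil =>
      intro pre hlen
      simp only [List.length_nil, Nat.add_zero] at hlen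
      rw [PySem.List.pyRange_one_eq_nil (by omega)]
      simp [List.drop_eq_nil_of_le (show vs.length ≤ pre.length by omega)]
  | cons c t ih =>
      intro pre hlen
      have hlt : pre.length < vs.length := by simp at hlen; omega
      rw [PySem.List.pyRange_one_cons (by exact_mod_cast hlt)]
      simp only [List.foldl_cons]
      have hget : PySem.List.pyGetD (pre ++ c :: t) (pre.length : Int) ' ' = c := by
        rw [PySem.List.pyGetD_natCast, List.getD_eq_getElem?_getD,
            List.getElem?_append_right (le_refl _)]
        simp
      have hv : PySem.List.pyGetD vs (pre.length : Int) ' ' = vs[pre.length] := by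
        rw [PySem.List.pyGetD_natCast, List.getD_eq_getElem?_getD,
            List.getElem?_eq_getElem hlt]
        rfl
      have hdrop : vs.drop pre.length = vs[pre.length] :: vs.drop (pre.length + 1) :=
        List.drop_eq_getElem_cons hlt
      by_cases hc : c = 'X'
      · rw [hget, if_pos hc, hv]
        have hset : (pre ++ c :: t).set ((pre.length : Int)).toNat vs[pre.length]
            = (pre ++ [vs[pre.length]]) ++ t := by
          rw [Int.toNat_natCast, List.set_append, if_neg (by omega)]
          simp
        rw [hset]
        have := ih (pre ++ [vs[pre.length]]) (by simp at hlen ⊢; omega)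
        simp only [List.length_append, List.length_singleton] at this
        push_cast at this ⊢
        rw [this, hdrop, List.zipWith_cons_cons, if_pos hc, List.append_assoc,
            List.singleton_append]
      · rw [hget, if_neg hc]
        have := ih (pre ++ [c]) (by simp at hlen ⊢; omega)
        simp only [List.length_append, List.length_singleton] at this
        push_cast at this ⊢
        rw [List.append_cons pre c t, this, hdrop, List.zipWith_cons_cons, if_neg hc,
            List.append_assoc, List.singleton_append]

-- per-mem-instruction value agreement
lemma mem_value_eq (cs : List Char) (v : Int) (hlen : cs.length = 36)
    (h0 : 0 ≤ v) (hv : v < 2 ^ 36) :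
    parseBin2 ((PySem.List.pyRange 0 (cs.length : Int) 1).foldl
      (fun c i => if PySem.List.pyGetD c i ' ' = 'X'
                  then c.set i.toNat (PySem.List.pyGetD
                    (List.replicate (cs.length
                        - (PySem.List.slice (PySem.Int.toBinChars0b v) (some 2) none).length) '0'
                      ++ PySem.List.slice (PySem.Int.toBinChars0b v) (some 2) none) i ' ')
                  else c) cs)
    = PySem.Int.bor (PySem.Int.band v (andInt cs)) (parseBin2 cs) := by
  have hn : v = ((v.toNat : Nat) : Int) := by omega
  set n := v.toNat with hdefn
  have hnlt : n < 2 ^ 36 := by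
    have h1 : (n : Int) < (2 : Int) ^ 36 := by rw [← hn]; exact hv
    exact_mod_cast h1
  have hslice : PySem.List.slice (PySem.Int.toBinChars0b v) (some 2) none = binDigits n := by
    rw [PySem.List.slice_from _ (by norm_num), PySem.Int.toBinChars0b, if_neg (by omega)]
    simp [toDigits_eq_binDigits, hdefn]
  rw [hslice]
  set val := List.replicate (cs.length - (binDigits n).length) '0' ++ binDigits n with hval
  have hLb : (binDigits n).length ≤ 36 := binDigits_length n 36 (by omega) hnlt
  have hvallen : val.length = 36 := by rw [hval]; simp [hlen]; omega
  have hvalval : valN g1 val = n := by rw [hval, valN_replicate_zero g1 rfl, binDigits_val]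
  have hcl : (cs.length : Int) = (val.length : Int) := by rw [hlen, hvallen]
  have hloop := loop_aux val cs [] (by simp [hlen, hvallen])
  simp only [List.length_nil, Nat.cast_zero, List.nil_append, List.drop_zero] at hloop
  rw [hcl, hloop, parseBin2_eq_valN, core_bitwise cs val (by rw [hlen, hvallen]), hvalval,
      andInt_eq_valN, parseBin2_eq_valN cs, hn, PySem.Int.band_natCast, PySem.Int.bor_natCast]

-- the two loops agree on the dict component
lemma fold_inv (insts : List (List String)) : ∀ (d : PySem.Dict String Int) (m : String),
    preB insts = true →
    (hasMemB insts = true → m.toList.length = 36) →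
    (insts.foldl stepA (d, m)).1
      = (insts.foldl stepB (d, parseBin2 m.toList, andInt m.toList)).1 := by
  induction insts with
  | nil => intro d m _ _; rfl
  | cons inst rest ih =>
      intro d m hpre hm
      rw [preB, Bool.and_eq_true, Bool.and_eq_true] at hpre
      obtain ⟨⟨hlen2, hinst⟩, hpre'⟩ := hpre
      simp only [List.foldl_cons]
      by_cases hmask : PySem.List.pyGetD inst 0 "" = "mask"
      · rw [if_pos hmask] at hinst
        have hA : stepA (d, m) inst = (d, PySem.List.pyGetD inst 1 "") := by
          simp [stepA, hmask]
        have hB : stepB (d, parseBin2 m.toList, andInt m.toList) inst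
            = (d, parseBin2 (PySem.List.pyGetD inst 1 "").toList,
                 andInt (PySem.List.pyGetD inst 1 "").toList) := by
          simp [stepB, hmask, pair_fold, parseBin2, andInt]
        rw [hA, hB]
        refine ih d _ hpre' ?_
        intro hmem
        rw [hmem, Bool.not_true, Bool.false_or, maskOkB, Bool.and_eq_true] at hinst
        simpa using hinst.1
      · have hmem36 : m.toList.length = 36 := by
          refine hm ?_
          rw [hasMemB, List.any_cons, Bool.or_eq_true]
          exact Or.inl (by simpa using hmask)
        rw [if_neg hmask, valOkB, Bool.and_eq_true, decide_eq_true_eq, decide_eq_true_eq] at hinst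
        obtain ⟨hge, hlt⟩ := hinst
        obtain ⟨w, hw⟩ : ∃ w, PySem.Int.ofStr? (PySem.List.pyGetD inst 1 "") = some w := by
          cases h : PySem.Int.ofStr? (PySem.List.pyGetD inst 1 "") with
          | none => rw [h] at hge; simp at hge
          | some w => exact ⟨w, rfl⟩
        rw [hw] at hge hlt
        simp only [Option.getD_some] at hge hlt
        have hA : stepA (d, m) inst
            = (d.insert (PySem.Str.slice (PySem.List.pyGetD inst 0 "") (some 4) (some (-1)))
                (PySem.Int.bor (PySem.Int.band w (andInt m.toList)) (parseBin2 m.toList)), m) := by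
          simp only [stepA, if_neg hmask, hw, Option.getD_some]
          rw [← mem_value_eq m.toList w hmem36 hge hlt]
        have hB : stepB (d, parseBin2 m.toList, andInt m.toList) inst
            = (d.insert (PySem.Str.slice (PySem.List.pyGetD inst 0 "") (some 4) (some (-1)))
                (PySem.Int.bor (PySem.Int.band w (andInt m.toList)) (parseBin2 m.toList)),
               parseBin2 m.toList, andInt m.toList) := by
          simp only [stepB, if_neg hmask, hw, Option.getD_some]
        rw [hA, hB]
        exact ih _ m hpre' (fun _ => hmem36)

-- ===== VERDICT (by name: the statement is the Claim_ definition above) =====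
theorem part1_spec : Claim_equal_part1 := by
  intro insts _ hpre
  unfold Spec_part1 part1 part1_alt
  have h36 : (String.ofList (List.replicate 36 'X')).toList.length = 36 := by
    rw [String.toList_ofList]; simp
  have hinv := fold_inv insts PySem.Dict.empty (String.ofList (List.replicate 36 'X')) hpre
    (fun _ => h36)
  rw [String.toList_ofList] at hinv
  have hor : parseBin2 (List.replicate 36 'X') = 0 := by decide
  have hand : andInt (List.replicate 36 'X') = (1 <<< 36) - 1 := by decide
  rw [hor, hand] at hinv
  exact congrArg (fun d : PySem.Dict String Int => d.values.sum) hinv
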